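-- pv_equiv track=rewrite | github.com/MatMaxMatrix/Code-For-Fun | password_check/main.py | suggerimenti
-- ===== SOURCE A (Python) =====
-- def suggerimenti(password: str, risultati_metodo: dict):
--     """
--     Fornisce suggerimenti per migliorare la password se risultata debole in uno qualsiasi dei metodi applicati.
--     """
--     suggerimenti_list = []
--     if not risultati_metodo.get("Metodo Base", (True, ""))[0]:
--         if len(password) < 8:
--             suggerimenti_list.append("allunga la password (minimo 8 caratteri)")
--         if not any(c.isupper() for c in password):
--             suggerimenti_list.append("includi almeno una lettera maiuscola")
--         if not any(c.islower() for c in password):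
--             suggerimenti_list.append("includi almeno una lettera minuscola")
--         if not any(c.isdigit() for c in password):
--             suggerimenti_list.append("includi almeno un numero")
--         if not any(not c.isalnum() for c in password):
--             suggerimenti_list.append("includi almeno un simbolo speciale")
--
--     if "Metodo Avanzato" in risultati_metodo and not risultati_metodo["Metodo Avanzato"][0]:
--         suggerimenti_list.append("Attenzione! La password provata è presente nella lista di password compromesse")
--     if "Metodo Euristico" in risultati_metodo and not risultati_metodo["Metodo Euristico"][0]:
--         suggerimenti_list.append("Attenzione! Evita password comuni")
--
--     return suggerimenti_list if suggerimenti_list else ["Password robusta."]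
-- ===== SOURCE B (Python) =====
-- def suggerimenti(password: str, risultati_metodo: dict):
--     has_upper = has_lower = has_digit = has_special = False
--     for c in password:
--         if c.isupper():
--             has_upper = True
--         elif c.islower():
--             has_lower = True
--         elif c.isdigit():
--             has_digit = True
--         elif not c.isalnum():
--             has_special = True
--
--     out = []
--     if not risultati_metodo.get("Metodo Base", (True, ""))[0]:
--         checks = [
--             (len(password) >= 8, "allunga la password (minimo 8 caratteri)"),
--             (has_upper, "includi almeno una lettera maiuscola"),
--             (has_lower, "includi almeno una lettera minuscola"),
--             (has_digit, "includi almeno un numero"),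
--             (has_special, "includi almeno un simbolo speciale"),
--         ]
--         out = [msg for ok, msg in checks if not ok]
--
--     tail_checks = [
--         ("Metodo Avanzato", "Attenzione! La password provata è presente nella lista di password compromesse"),
--         ("Metodo Euristico", "Attenzione! Evita password comuni"),
--     ]
--     out += [msg for key, msg in tail_checks
--             if key in risultati_metodo and not risultati_metodo[key][0]]
--
--     return out if out else ["Password robusta."]
-- ===== Notes on version B (the rewrite author's own statement) =====
-- stated objective: alternative
-- what changed: B replaces A's five independent any()-scans over the password with one single pass maintaining four class flags, and builds the suggestion list by filtering a (condition, message) table instead of a chain of conditional appends.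
import Mathlib
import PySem

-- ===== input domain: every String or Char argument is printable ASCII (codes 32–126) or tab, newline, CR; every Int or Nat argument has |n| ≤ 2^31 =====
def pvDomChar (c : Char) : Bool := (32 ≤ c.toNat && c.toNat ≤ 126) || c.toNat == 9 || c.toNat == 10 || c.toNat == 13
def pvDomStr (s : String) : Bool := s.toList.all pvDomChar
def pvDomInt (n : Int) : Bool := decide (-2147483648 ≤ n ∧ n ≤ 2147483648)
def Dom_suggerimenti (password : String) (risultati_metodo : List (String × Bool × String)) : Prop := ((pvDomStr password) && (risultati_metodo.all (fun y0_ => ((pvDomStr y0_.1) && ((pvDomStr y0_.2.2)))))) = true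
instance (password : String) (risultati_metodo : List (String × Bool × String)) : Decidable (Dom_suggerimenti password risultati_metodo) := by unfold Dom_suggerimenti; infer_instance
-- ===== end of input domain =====

-- B makes one pass over the password maintaining four class flags and builds the
-- suggestion list by filtering a (condition, message) table, instead of A's five
-- separate any()-scans with a chain of conditional appends (objective: alternative).


-- ===== PORT A =====
def suggerimenti (password : String) (risultati_metodo : List (String × Bool × String)) : List String :=
  let d : PySem.Dict String (Bool × String) := PySem.Dict.ofList risultati_metodo
  let cs := password.toList
  let l0 : List String := []
  let l1 :=
    if (d.getD "Metodo Base" (true, "")).1 = false then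
      let a := if PySem.Str.len password < 8 then l0 ++ ["allunga la password (minimo 8 caratteri)"] else l0
      let b := if (cs.any PySem.Chars.isupper) = false then a ++ ["includi almeno una lettera maiuscola"] else a
      let c := if (cs.any PySem.Chars.islower) = false then b ++ ["includi almeno una lettera minuscola"] else b
      let e := if (cs.any PySem.Chars.isdigit) = false then c ++ ["includi almeno un numero"] else c
      if (cs.any (fun ch => !PySem.Chars.isalnum ch)) = false then e ++ ["includi almeno un simbolo speciale"] else e
    else l0
  let l2 := if d.contains "Metodo Avanzato" && !(((d.get? "Metodo Avanzato").getD (true, "")).1)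
            then l1 ++ ["Attenzione! La password provata è presente nella lista di password compromesse"] else l1
  let l3 := if d.contains "Metodo Euristico" && !(((d.get? "Metodo Euristico").getD (true, "")).1)
            then l2 ++ ["Attenzione! Evita password comuni"] else l2
  if l3.isEmpty then ["Password robusta."] else l3

-- ===== PORT B =====
-- single pass over the characters, four flags (elif chain, as in Source B)
def pvFlags (cs : List Char) : Bool × Bool × Bool × Bool :=
  cs.foldl (fun s c =>
    if PySem.Chars.isupper c then (true, s.2.1, s.2.2.1, s.2.2.2)
    else if PySem.Chars.islower c then (s.1, true, s.2.2.1, s.2.2.2)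
    else if PySem.Chars.isdigit c then (s.1, s.2.1, true, s.2.2.2)
    else if !PySem.Chars.isalnum c then (s.1, s.2.1, s.2.2.1, true)
    else s) (false, false, false, false)

def suggerimenti_alt (password : String) (risultati_metodo : List (String × Bool × String)) : List String :=
  let d : PySem.Dict String (Bool × String) := PySem.Dict.ofList risultati_metodo
  let f := pvFlags password.toList
  let out1 : List String :=
    if (d.getD "Metodo Base" (true, "")).1 = false then
      ([(decide (8 ≤ PySem.Str.len password), "allunga la password (minimo 8 caratteri)"),
        (f.1, "includi almeno una lettera maiuscola"),
        (f.2.1, "includi almeno una lettera minuscola"),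
        (f.2.2.1, "includi almeno un numero"),
        (f.2.2.2, "includi almeno un simbolo speciale")] : List (Bool × String)).filterMap
        (fun p => if p.1 then none else some p.2)
    else []
  let tail :=
    ([("Metodo Avanzato", "Attenzione! La password provata è presente nella lista di password compromesse"),
      ("Metodo Euristico", "Attenzione! Evita password comuni")] : List (String × String)).filterMap
      (fun p => if d.contains p.1 && !(((d.get? p.1).getD (true, "")).1) then some p.2 else none)
  let out := out1 ++ tail
  if out.isEmpty then ["Password robusta."] else out

-- ===== PRECONDITION & SPEC =====
def Spec_suggerimenti (password : String) (risultati_metodo : List (String × Bool × String)) (out : List String) : Prop := out = suggerimenti_alt password risultati_metodo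
instance (password : String) (risultati_metodo : List (String × Bool × String)) (out : List String) : Decidable (Spec_suggerimenti password risultati_metodo out) := by unfold Spec_suggerimenti; infer_instance

-- ===== CLAIM (what is proved, stated in full; the proofs are below) =====
def Claim_equal_suggerimenti : Prop := ∀ (password : String) (risultati_metodo : List (String × Bool × String)), Dom_suggerimenti password risultati_metodo → Spec_suggerimenti password risultati_metodo (suggerimenti password risultati_metodo)

-- ===== LEMMAS AND PROOFS =====

theorem upper_not_lower (c : Char) (h : PySem.Chars.isupper c = true) : PySem.Chars.islower c = false := by
  simp [PySem.Chars.isupper, PySem.Chars.islower, Char.le_def, UInt32.le_iff_toNat_le] at *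
  omega

theorem upper_not_digit (c : Char) (h : PySem.Chars.isupper c = true) : PySem.Chars.isdigit c = false := by
  simp [PySem.Chars.isupper, PySem.Chars.isdigit, Char.le_def, UInt32.le_iff_toNat_le] at *
  omega

theorem lower_not_digit (c : Char) (h : PySem.Chars.islower c = true) : PySem.Chars.isdigit c = false := by
  simp [PySem.Chars.islower, PySem.Chars.isdigit, Char.le_def, UInt32.le_iff_toNat_le] at *
  omega

theorem pvFlags_fold (cs : List Char) (b1 b2 b3 b4 : Bool) :
    cs.foldl (fun s c =>
      if PySem.Chars.isupper c then (true, s.2.1, s.2.2.1, s.2.2.2)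
      else if PySem.Chars.islower c then (s.1, true, s.2.2.1, s.2.2.2)
      else if PySem.Chars.isdigit c then (s.1, s.2.1, true, s.2.2.2)
      else if !PySem.Chars.isalnum c then (s.1, s.2.1, s.2.2.1, true)
      else s) (b1, b2, b3, b4) =
    (b1 || cs.any PySem.Chars.isupper, b2 || cs.any PySem.Chars.islower,
     b3 || cs.any PySem.Chars.isdigit, b4 || cs.any (fun ch => !PySem.Chars.isalnum ch)) := by
  induction cs generalizing b1 b2 b3 b4 with
  | nil => simp
  | cons c cs ih =>
    simp only [List.foldl_cons, List.any_cons]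
    simp only [Prod.mk.eta, Bool.not_eq_eq_eq_not, Bool.not_true] at ih
    by_cases hu : PySem.Chars.isupper c = true
    · have ha : (!PySem.Chars.isalnum c) = false := by
        simp [PySem.Chars.isalnum, PySem.Chars.isalpha, hu]
      simp [hu, upper_not_lower c hu, upper_not_digit c hu, ha, ih]
    · by_cases hl : PySem.Chars.islower c = true
      · have ha : (!PySem.Chars.isalnum c) = false := by
          simp [PySem.Chars.isalnum, PySem.Chars.isalpha, hl]
        simp [hu, hl, lower_not_digit c hl, ha, ih]
      · by_cases hd : PySem.Chars.isdigit c = true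
        · have ha : (!PySem.Chars.isalnum c) = false := by
            simp [PySem.Chars.isalnum, hd]
          simp [hu, hl, hd, ha, ih]
        · by_cases ha : PySem.Chars.isalnum c = true
          · simp [hu, hl, hd, ha, ih]
          · simp [hu, hl, hd, ha, ih]

theorem pvFlags_eq (cs : List Char) :
    pvFlags cs = (cs.any PySem.Chars.isupper, cs.any PySem.Chars.islower,
                  cs.any PySem.Chars.isdigit, cs.any (fun ch => !PySem.Chars.isalnum ch)) := by
  rw [pvFlags, pvFlags_fold]
  simp

-- ===== VERDICT (by name: the statement is the Claim_ definition above) =====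
set_option maxHeartbeats 2000000 in
theorem suggerimenti_spec : Claim_equal_suggerimenti := by
  intro password risultati_metodo _
  unfold Spec_suggerimenti suggerimenti suggerimenti_alt
  simp only [pvFlags_eq, List.filterMap_cons, List.filterMap_nil]
  generalize (PySem.Dict.ofList risultati_metodo : PySem.Dict String (Bool × String)) = d
  generalize hb : (d.getD "Metodo Base" (true, "")).1 = base
  generalize h1 : password.toList.any PySem.Chars.isupper = u
  generalize h2 : password.toList.any PySem.Chars.islower = lo
  generalize h3 : password.toList.any PySem.Chars.isdigit = dg
  generalize h4 : password.toList.any (fun ch => !PySem.Chars.isalnum ch) = sp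
  generalize ht1 : (d.contains "Metodo Avanzato" && !(((d.get? "Metodo Avanzato").getD (true, "")).1)) = t1
  generalize ht2 : (d.contains "Metodo Euristico" && !(((d.get? "Metodo Euristico").getD (true, "")).1)) = t2
  generalize hL : PySem.Str.len password = n
  by_cases hn : n < 8
  · have hn2 : ¬((8 : Int) ≤ n) := by omega
    rcases base <;> rcases u <;> rcases lo <;> rcases dg <;> rcases sp <;> rcases t1 <;> rcases t2 <;>
      simp [hn, hn2]
  · have hn2 : ((8 : Int) ≤ n) := by omega
    rcases base <;> rcases u <;> rcases lo <;> rcases dg <;> rcases sp <;> rcases t1 <;> rcases t2 <;>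
      simp [hn, hn2]
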